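-- pv_equiv track=rewrite | github.com/FacuRomero01/Programacion-1-UTN | Practica_1er_parcial/Practica_1er_parcial_2.py | chequea_3_numeros_iguales_vertical
-- ===== SOURCE A (Python) =====
-- def chequea_3_numeros_iguales_vertical(matriz:list) -> any:
--     res = None
--     for columna in range(len(matriz[0])):
--         for fila in range(len(matriz) - 2):
--             numero = matriz[fila][columna]
--             if matriz[fila][columna] == matriz[fila+1][columna] == matriz[fila+2][columna]:
--                 res = numero
--     return res
-- ===== SOURCE B (Python) =====
-- def chequea_3_numeros_iguales_vertical(matriz: list) -> any:
--     # one row-major pass: per column keep (current value, run length,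
--     # value of the latest completed vertical triple), then take the
--     # rightmost / lowest recorded triple
--     estados = [(None, 0, None)] * len(matriz[0])
--     if len(matriz) < 3:
--         return None
--     for fila in matriz:
--         nuevos = []
--         for c, (val, cnt, ult) in enumerate(estados):
--             x = fila[c]
--             cnt = cnt + 1 if x == val else 1
--             nuevos.append((x, cnt, x if cnt >= 3 else ult))
--         estados = nuevos
--     res = None
--     for _, _, ult in estados:
--         if ult is not None:
--             res = ult
--     return res
-- ===== Notes on version B (the rewrite author's own statement) =====
-- stated objective: alternative
-- what changed: B replaces A's per-cell triple test over a column-major double loop by a single row-major pass that maintains a run-length counter per column (value, run length, latest completed triple) and then picks the rightmost column's latest triple; A's nested O(rows*cols) triple comparisons disappear.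
-- outside the precondition, e.g. on chequea_3_numeros_iguales_vertical([[7, 3], [0, 3], [7, 3], [0, 9], [5]]): A returns 3, B raises IndexError; on chequea_3_numeros_iguales_vertical([[1, 1], [1], [1]]): A raises IndexError, B raises IndexError
import Mathlib
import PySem

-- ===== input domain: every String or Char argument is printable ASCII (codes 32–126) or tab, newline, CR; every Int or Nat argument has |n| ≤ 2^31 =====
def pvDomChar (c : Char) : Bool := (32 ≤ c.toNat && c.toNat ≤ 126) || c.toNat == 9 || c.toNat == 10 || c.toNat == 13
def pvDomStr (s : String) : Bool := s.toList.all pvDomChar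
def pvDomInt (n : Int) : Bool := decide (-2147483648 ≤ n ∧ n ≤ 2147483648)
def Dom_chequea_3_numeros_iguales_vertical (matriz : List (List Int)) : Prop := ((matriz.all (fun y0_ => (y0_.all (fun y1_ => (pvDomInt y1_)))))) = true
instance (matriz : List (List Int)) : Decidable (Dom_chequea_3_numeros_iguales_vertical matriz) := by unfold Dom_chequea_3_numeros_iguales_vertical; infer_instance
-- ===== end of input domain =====

-- B replaces A's column-major per-cell triple test by one row-major pass that keeps a
-- run-length state per column; same result, a genuinely different algorithm ("alternative").

-- ===== PORT A =====
-- matriz[fila][columna]; exact on Pre_ inputs, where every accessed index is in range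
def pvAt (m : List (List Int)) (f c : Nat) : Int := (m.getD f []).getD c 0

def chequea_3_numeros_iguales_vertical (matriz : List (List Int)) : Option Int :=
  (List.range matriz.headI.length).foldl (fun res columna =>
    (List.range (matriz.length - 2)).foldl (fun res fila =>
      let numero := pvAt matriz fila columna
      if pvAt matriz fila columna = pvAt matriz (fila+1) columna ∧
         pvAt matriz (fila+1) columna = pvAt matriz (fila+2) columna
      then some numero else res) res) none

-- ===== PORT B =====
-- per-column step: x is the cell of the current row in this column;
-- state = (current value, run length, value of the latest completed vertical triple)
def pvPaso (x : Int) (st : Option Int × Int × Option Int) : Option Int × Int × Option Int :=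
  let cnt := if st.1 = some x then st.2.1 + 1 else 1
  (some x, cnt, if (3:Int) ≤ cnt then some x else st.2.2)

def chequea_3_numeros_iguales_vertical_alt (matriz : List (List Int)) : Option Int :=
  let estados0 : List (Option Int × Int × Option Int) :=
    List.replicate matriz.headI.length (none, 0, none)
  if matriz.length < 3 then none
  else
    ((matriz.foldl (fun estados fila =>
        (PySem.List.enumerate estados).map (fun p => pvPaso (fila.getD p.1.toNat 0) p.2))
      estados0).foldl
      (fun res st => match st.2.2 with | some u => some u | none => res) none)

-- ===== PRECONDITION & SPEC =====
-- Pre_ excludes the empty matrix (matriz[0] raises IndexError in both) and ragged matrices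
-- with ≥ 3 rows where some row is shorter than row 0: there both programs usually raise
-- IndexError, and where A's chained-comparison short-circuiting lets it return, its value
-- is an accident of evaluation order on a malformed (non-rectangular) matrix while B raises.
def Pre_chequea_3_numeros_iguales_vertical (matriz : List (List Int)) : Prop :=
  matriz ≠ [] ∧ (matriz.length ≤ 2 ∨ ∀ r ∈ matriz, matriz.headI.length ≤ r.length)
instance (matriz : List (List Int)) : Decidable (Pre_chequea_3_numeros_iguales_vertical matriz) := by unfold Pre_chequea_3_numeros_iguales_vertical; infer_instance

def pvWitness_chequea_3_numeros_iguales_vertical : List (List Int) := [[1, 2], [1, 3], [1, 3]]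

def Spec_chequea_3_numeros_iguales_vertical (matriz : List (List Int)) (out : Option Int) : Prop := out = chequea_3_numeros_iguales_vertical_alt matriz
instance (matriz : List (List Int)) (out : Option Int) : Decidable (Spec_chequea_3_numeros_iguales_vertical matriz out) := by unfold Spec_chequea_3_numeros_iguales_vertical; infer_instance

-- ===== CLAIM (what is proved, stated in full; the proofs are below) =====
def Claim_equal_chequea_3_numeros_iguales_vertical : Prop := ∀ (matriz : List (List Int)), Dom_chequea_3_numeros_iguales_vertical matriz → Pre_chequea_3_numeros_iguales_vertical matriz → Spec_chequea_3_numeros_iguales_vertical matriz (chequea_3_numeros_iguales_vertical matriz)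

-- ===== LEMMAS AND PROOFS =====

-- the column of m at index c, as the ports read it (getD with default 0)
def pvCol (m : List (List Int)) (c : Nat) : List Int := m.map (fun r => r.getD c 0)

-- per-column run-length fold (B's step folded over one column)
def pvRun (col : List Int) : Option Int × Int × Option Int :=
  col.foldl (fun st x => pvPaso x st) (none, 0, none)

-- A's inner fold on one column, started from none
def pvScan (col : List Int) (n : Nat) : Option Int :=
  (List.range n).foldl (fun res f =>
    if col.getD f 0 = col.getD (f+1) 0 ∧ col.getD (f+1) 0 = col.getD (f+2) 0
    then some (col.getD f 0) else res) none

-- B's per-row update of the whole state list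
def pvStep (estados : List (Option Int × Int × Option Int)) (fila : List Int) :
    List (Option Int × Int × Option Int) :=
  (PySem.List.enumerate estados).map (fun p => pvPaso (fila.getD p.1.toNat 0) p.2)

theorem foldl_congr_mem' {α β : Type} (l : List α) (f g : β → α → β) (init : β)
    (h : ∀ r, ∀ x ∈ l, f r x = g r x) : l.foldl f init = l.foldl g init := by
  induction l generalizing init with
  | nil => rfl
  | cons x l ih =>
    simp only [List.foldl_cons]
    rw [h init x (by simp)]
    exact ih _ (fun r y hy => h r y (by simp [hy]))

theorem foldl_const {α β : Type} (l : List α) (init : β) :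
    l.foldl (fun r _ => r) init = init := by
  induction l with
  | nil => rfl
  | cons x l ih => simp [ih]

-- "overwrite on hit" fold: the initial accumulator only survives if no hit occurs
theorem foldl_elim_init {α β : Type} (l : List α) (g : α → Option β) (init : Option β) :
    l.foldl (fun r x => (g x).elim r some) init
      = ((l.foldl (fun r x => (g x).elim r some) none).elim init some) := by
  induction l generalizing init with
  | nil => simp
  | cons x l ih =>
    simp only [List.foldl_cons]
    rw [ih ((g x).elim init some), ih ((g x).elim none some)]
    cases h : l.foldl (fun r x => (g x).elim r some) none <;> cases g x <;> simp

theorem pvStep_length (est : List (Option Int × Int × Option Int)) (fila : List Int) :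
    (pvStep est fila).length = est.length := by
  simp [pvStep, PySem.List.length_enumerate]

theorem pvStep_getD (est : List (Option Int × Int × Option Int)) (fila : List Int)
    (c : Nat) (d : Option Int × Int × Option Int) (h : c < est.length) :
    (pvStep est fila).getD c d = pvPaso (fila.getD c 0) (est.getD c d) := by
  have h' : c < (PySem.List.enumerate est 0).length := by
    simpa [PySem.List.length_enumerate] using h
  simp [pvStep, List.getD_eq_getElem?_getD, List.getElem?_map,
        PySem.List.getElem?_enumerate, List.getElem?_eq_getElem h]

theorem fold_rows_length (rows : List (List Int)) (est : List (Option Int × Int × Option Int)) :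
    (rows.foldl pvStep est).length = est.length := by
  induction rows generalizing est with
  | nil => rfl
  | cons r rows ih => simp [List.foldl_cons, ih, pvStep_length]

theorem fold_rows_getD (rows : List (List Int)) (est : List (Option Int × Int × Option Int))
    (c : Nat) (d : Option Int × Int × Option Int) (h : c < est.length) :
    (rows.foldl pvStep est).getD c d
      = (rows.map (fun r => r.getD c 0)).foldl (fun st x => pvPaso x st) (est.getD c d) := by
  induction rows generalizing est with
  | nil => rfl
  | cons r rows ih =>
    simp only [List.foldl_cons, List.map_cons]
    rw [ih (pvStep est r) (by simp only [pvStep_length]; exact h), pvStep_getD est r c d h]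

theorem pvScan_congr (col1 col2 : List Int) (n : Nat)
    (h : ∀ j, j < n + 2 → col1.getD j 0 = col2.getD j 0) :
    pvScan col1 n = pvScan col2 n := by
  unfold pvScan
  apply foldl_congr_mem'
  intro r f hf
  rw [List.mem_range] at hf
  rw [h f (by omega), h (f+1) (by omega), h (f+2) (by omega)]

-- the run-length invariant: after folding a column prefix p,
-- the state is (last of p, run length at the end of p, last triple found in p)
theorem run_inv (p : List Int) :
    (pvRun p).1 = (if p = [] then none else some (p.getD (p.length - 1) 0))
  ∧ ((1:Int) ≤ (pvRun p).2.1 ↔ p ≠ [])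
  ∧ ((2:Int) ≤ (pvRun p).2.1 ↔ 2 ≤ p.length ∧ p.getD (p.length - 2) 0 = p.getD (p.length - 1) 0)
  ∧ (pvRun p).2.2 = pvScan p (p.length - 2) := by
  induction p using List.reverseRecOn with
  | nil => norm_num [pvRun, pvScan]
  | append_singleton p x ih =>
    obtain ⟨h1, h2, h3, h4⟩ := ih
    have hq : pvRun (p ++ [x]) = pvPaso x (pvRun p) := by
      simp [pvRun, List.foldl_append]
    rw [hq]
    by_cases hp : p = []
    · subst hp
      norm_num [pvRun, pvPaso, pvScan]
    · have hn : 1 ≤ p.length := List.length_pos_iff.2 hp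
      have h1' : (pvRun p).1 = some (p.getD (p.length - 1) 0) := by rw [h1, if_neg hp]
      have hgl : (p ++ [x]).getD (p.length - 1) 0 = p.getD (p.length - 1) 0 :=
        List.getD_append _ _ _ _ (by omega)
      have hgx : (p ++ [x]).getD p.length 0 = x := by
        rw [List.getD_append_right _ _ _ _ (le_refl _)]
        simp
      have hcnt : (pvPaso x (pvRun p)).2.1
          = if p.getD (p.length - 1) 0 = x then (pvRun p).2.1 + 1 else 1 := by
        simp [pvPaso, h1']
      have h2' : (1:Int) ≤ (pvRun p).2.1 := h2.2 hp
      refine ⟨?_, ?_, ?_, ?_⟩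
      · simp [pvPaso, List.length_append]
      · constructor
        · intro _; simp
        · intro _
          rw [hcnt]
          split <;> omega
      · rw [hcnt]
        simp only [List.length_append, List.length_cons, List.length_nil]
        have hsub : p.length + 1 - 1 = p.length := by omega
        have hsub2 : p.length + 1 - 2 = p.length - 1 := by omega
        rw [hsub, hsub2, hgx, hgl]
        split
        · rename_i heq
          constructor
          · intro _; exact ⟨by omega, heq⟩
          · intro _; omega
        · rename_i hne
          constructor
          · intro hc; omega
          · intro hc; exact absurd hc.2 hne
      · -- last-triple component
        have hu : (pvPaso x (pvRun p)).2.2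
            = if (3:Int) ≤ (pvPaso x (pvRun p)).2.1 then some x else (pvRun p).2.2 := by
          simp [pvPaso]
        rw [hu, hcnt]
        simp only [List.length_append, List.length_cons, List.length_nil]
        have hsub3 : p.length + 1 - 2 = p.length - 1 := by omega
        rw [hsub3]
        by_cases hn2 : 2 ≤ p.length
        · -- pvScan (p ++ [x]) (p.length - 1): peel the last index p.length - 2
          have hr : List.range (p.length - 1) = List.range (p.length - 2) ++ [p.length - 2] := by
            have : p.length - 1 = (p.length - 2) + 1 := by omega
            rw [this, List.range_succ]
          have hpre : pvScan (p ++ [x]) (p.length - 2) = pvScan p (p.length - 2) := by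
            apply pvScan_congr
            intro j hj
            exact List.getD_append _ _ _ _ (by omega)
          have hscan : pvScan (p ++ [x]) (p.length - 1)
              = if (p ++ [x]).getD (p.length - 2) 0 = (p ++ [x]).getD (p.length - 2 + 1) 0 ∧
                   (p ++ [x]).getD (p.length - 2 + 1) 0 = (p ++ [x]).getD (p.length - 2 + 2) 0
                then some ((p ++ [x]).getD (p.length - 2) 0)
                else pvScan (p ++ [x]) (p.length - 2) := by
            unfold pvScan
            rw [hr, List.foldl_append]
            rfl
          have hi1 : p.length - 2 + 1 = p.length - 1 := by omega
          have hi2 : p.length - 2 + 2 = p.length := by omega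
          have hg2 : (p ++ [x]).getD (p.length - 2) 0 = p.getD (p.length - 2) 0 :=
            List.getD_append _ _ _ _ (by omega)
          rw [hscan, hi1, hi2, hg2, hgl, hgx, hpre, h4]
          by_cases hlx : p.getD (p.length - 1) 0 = x
          · rw [if_pos hlx]
            have h3' : (2:Int) ≤ (pvRun p).2.1 ↔ p.getD (p.length - 2) 0 = p.getD (p.length - 1) 0 := by
              rw [h3]
              constructor
              · intro h; exact h.2
              · intro h; exact ⟨hn2, h⟩
            by_cases hpp : p.getD (p.length - 2) 0 = p.getD (p.length - 1) 0
            · have h2k : (2:Int) ≤ (pvRun p).2.1 := h3'.2 hpp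
              rw [if_pos (show (3:Int) ≤ (pvRun p).2.1 + 1 by omega),
                  if_pos (show p.getD (p.length - 2) 0 = p.getD (p.length - 1) 0 ∧
                               p.getD (p.length - 1) 0 = x from ⟨hpp, hlx⟩)]
              rw [hpp, hlx]
            · have h2k : ¬ (2:Int) ≤ (pvRun p).2.1 := fun hc => hpp (h3'.1 hc)
              rw [if_neg (show ¬ (3:Int) ≤ (pvRun p).2.1 + 1 by omega),
                  if_neg (show ¬ (p.getD (p.length - 2) 0 = p.getD (p.length - 1) 0 ∧
                                  p.getD (p.length - 1) 0 = x) from fun hc => hpp hc.1)]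
          · rw [if_neg hlx,
                if_neg (show ¬ (3:Int) ≤ 1 by norm_num),
                if_neg (show ¬ (p.getD (p.length - 2) 0 = p.getD (p.length - 1) 0 ∧
                                p.getD (p.length - 1) 0 = x) from fun hc => hlx hc.2)]
        · -- p.length = 1: no triple can complete yet
          have hn1 : p.length = 1 := by omega
          have hcnt2 : (pvRun p).2.1 < 2 := by
            by_contra hc
            have := h3.1 (by omega)
            omega
          rw [if_neg (show ¬ (3:Int) ≤ (if p.getD (p.length - 1) 0 = x then (pvRun p).2.1 + 1 else 1)
                by split <;> omega)]
          rw [h4, hn1]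
          norm_num [pvScan]

-- ===== VERDICT (by name: the statement is the Claim_ definition above) =====
theorem chequea_3_numeros_iguales_vertical_spec : Claim_equal_chequea_3_numeros_iguales_vertical := by
  intro m _ _
  unfold Spec_chequea_3_numeros_iguales_vertical
  unfold chequea_3_numeros_iguales_vertical chequea_3_numeros_iguales_vertical_alt
  by_cases hL : m.length < 3
  · -- fewer than 3 rows: A's inner range is empty, B's guard fires
    have h2 : m.length - 2 = 0 := by omega
    simp only [hL, if_pos, h2, List.range_zero, List.foldl_nil, foldl_const]
  · simp only [if_neg hL]
    -- A as a fold of per-column scans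
    have hA : (List.range m.headI.length).foldl (fun res columna =>
        (List.range (m.length - 2)).foldl (fun res fila =>
          let numero := pvAt m fila columna
          if pvAt m fila columna = pvAt m (fila+1) columna ∧
             pvAt m (fila+1) columna = pvAt m (fila+2) columna
          then some numero else res) res) none
      = (List.range m.headI.length).foldl
          (fun res c => (pvScan (pvCol m c) (m.length - 2)).elim res some) none := by
      apply foldl_congr_mem'
      intro res c _
      have hcol : ∀ j, j < (m.length - 2) + 2 → pvAt m j c = (pvCol m c).getD j 0 := by
        intro j hj
        have hjm : j < m.length := by omega
        simp [pvAt, pvCol, List.getD_eq_getElem?_getD, List.getElem?_map,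
              List.getElem?_eq_getElem hjm]
      calc (List.range (m.length - 2)).foldl (fun res fila =>
              let numero := pvAt m fila c
              if pvAt m fila c = pvAt m (fila+1) c ∧ pvAt m (fila+1) c = pvAt m (fila+2) c
              then some numero else res) res
          = (List.range (m.length - 2)).foldl (fun res f =>
              ((if (pvCol m c).getD f 0 = (pvCol m c).getD (f+1) 0 ∧
                   (pvCol m c).getD (f+1) 0 = (pvCol m c).getD (f+2) 0
                then some ((pvCol m c).getD f 0) else none).elim res some)) res := by
            apply foldl_congr_mem'
            intro r f hf
            rw [List.mem_range] at hf
            simp only [hcol f (by omega), hcol (f+1) (by omega), hcol (f+2) (by omega)]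
            split <;> simp
        _ = (pvScan (pvCol m c) (m.length - 2)).elim res some := by
            rw [foldl_elim_init]
            congr 1
            unfold pvScan
            apply foldl_congr_mem'
            intro r f _
            split <;> simp
    rw [hA]
    -- B as a fold of per-column run results
    have hfinal : ∀ c, c < m.headI.length →
        (m.foldl pvStep (List.replicate m.headI.length ((none : Option Int), (0:Int), (none : Option Int)))).getD
            c (none, 0, none)
          = pvRun (pvCol m c) := by
      intro c hc
      rw [fold_rows_getD _ _ _ _ (by simpa using hc)]
      simp [pvRun, pvCol, List.getD_eq_getElem?_getD, hc]
    -- rewrite B's inline row step as pvStep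
    have hstep : (fun (estados : List (Option Int × Int × Option Int)) (fila : List Int) =>
        (PySem.List.enumerate estados).map (fun p => pvPaso (fila.getD p.1.toNat 0) p.2)) = pvStep := rfl
    rw [hstep]
    set d : Option Int × Int × Option Int := (none, 0, none) with hd
    set final := m.foldl pvStep (List.replicate m.headI.length d) with hfin
    have hlen : final.length = m.headI.length := by
      rw [hfin, fold_rows_length, List.length_replicate]
    have hfe : final = (List.range m.headI.length).map (fun c => final.getD c d) := by
      apply List.ext_getElem
      · simp [hlen]
      · intro i h1 h2
        have hi : i < m.headI.length := by simpa [hlen] using h1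
        simp [List.getD_eq_getElem?_getD, List.getElem?_eq_getElem h1]
    symm
    calc final.foldl (fun res st => match st.2.2 with | some u => some u | none => res) none
        = ((List.range m.headI.length).map (fun c => final.getD c d)).foldl
            (fun res st => match st.2.2 with | some u => some u | none => res) none := by
          rw [← hfe]
      _ = (List.range m.headI.length).foldl
            (fun res c => ((final.getD c d).2.2).elim res some) none := by
          rw [List.foldl_map]
          apply foldl_congr_mem'
          intro r c _
          cases (final.getD c d).2.2 <;> rfl
      _ = (List.range m.headI.length).foldl
            (fun res c => (pvScan (pvCol m c) (m.length - 2)).elim res some) none := by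
          apply foldl_congr_mem'
          intro r c hc
          rw [List.mem_range] at hc
          rw [hfin, hfinal c hc, (run_inv (pvCol m c)).2.2.2]
          have : (pvCol m c).length = m.length := by simp [pvCol]
          rw [this]
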